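-- pv_equiv track=rewrite | github.com/yangzhanwu/DLUT_auto_login | des.py | get_key_bytes
-- ===== SOURCE A (Python) =====
-- def get_key_bytes(key):
--     key_bytes = []
--     leng = len(key)
--     iterator = leng // 4
--     remainder = leng % 4
--     for i in range(iterator):
--         key_bytes.append(str_to_bt(key[i*4:(i+1)*4]))
--     if remainder > 0:
--         key_bytes.append(str_to_bt(key[iterator*4:]))
--     return key_bytes
--
-- def str_to_bt(s):
--     leng = len(s)
--     bt = [0] * 64
--     if leng < 4:
--         for i in range(leng):
--             k = ord(s[i])
--             for j in range(16):
--                 bt[16*i+j] = (k >> (15-j)) & 1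
--         for p in range(leng, 4):
--             for q in range(16):
--                 bt[16*p+q] = 0
--     else:
--         for i in range(4):
--             k = ord(s[i])
--             for j in range(16):
--                 bt[16*i+j] = (k >> (15-j)) & 1
--     return bt
-- ===== SOURCE B (Python) =====
-- def get_key_bytes(key):
--     nblocks = (len(key) + 3) // 4
--     big = 0
--     for ch in key:
--         big = (big << 16) | ord(ch)
--     big <<= 16 * (4 * nblocks - len(key))
--     total = 64 * nblocks
--     bits = [(big >> (total - 1 - t)) & 1 for t in range(total)]
--     return [bits[i:i + 64] for i in range(0, total, 64)]
-- ===== Notes on version B (the rewrite author's own statement) =====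
-- stated objective: alternative
-- what changed: Instead of A's chunk-by-chunk loop with the mutating str_to_bt helper and a remainder special-case, B packs the whole key into one big integer (16 bits per character, shifted up to a block boundary), reads the bit stream off that integer by shifting and masking, and slices the stream into 64-bit blocks.
import Mathlib
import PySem

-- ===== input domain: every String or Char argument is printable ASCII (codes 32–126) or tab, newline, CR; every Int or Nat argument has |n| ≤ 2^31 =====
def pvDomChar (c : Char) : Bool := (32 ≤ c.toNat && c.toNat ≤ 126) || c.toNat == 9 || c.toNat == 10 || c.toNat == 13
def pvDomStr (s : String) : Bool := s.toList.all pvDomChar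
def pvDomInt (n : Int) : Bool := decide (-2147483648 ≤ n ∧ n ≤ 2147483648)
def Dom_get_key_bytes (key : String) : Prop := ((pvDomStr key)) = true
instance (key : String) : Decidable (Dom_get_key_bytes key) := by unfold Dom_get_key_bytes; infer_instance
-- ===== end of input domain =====

-- B abandons A's per-chunk helper entirely: it packs the whole key into ONE big integer
-- (16 bits per character, zero-padded to a block boundary), reads the bit stream off that
-- integer by shifting, and slices the stream into 64-bit blocks (objective: alternative).

-- ===== PORT A =====
-- A-side helper: write char i's 16 bits into bt (the body of A's inner `for j in range(16)` loops)
def pvWriteChar (s : List Char) (bt : List Int) (i : Nat) : List Int :=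
  let k : Int := (s[i]!.toNat : Int)
  (List.range 16).foldl (fun bt j => bt.set (16 * i + j) (PySem.Int.band (k >>> (15 - j)) 1)) bt

-- literal port of str_to_bt (Nat arithmetic is exact: all Python ints here are nonnegative)
def str_to_bt (s : List Char) : List Int :=
  let leng := s.length
  let bt : List Int := List.replicate 64 0
  if leng < 4 then
    let bt := (List.range leng).foldl (pvWriteChar s) bt
    (List.range' leng (4 - leng)).foldl
      (fun bt p => (List.range 16).foldl (fun bt q => bt.set (16 * p + q) 0) bt) bt
  else
    (List.range 4).foldl (pvWriteChar s) bt

def get_key_bytes (key : String) : List (List Int) :=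
  let cs := key.toList
  let leng := cs.length
  let iterator := leng / 4
  let remainder := leng % 4
  let key_bytes :=
    (List.range iterator).foldl
      (fun acc i =>
        acc ++ [str_to_bt (PySem.List.slice cs (some ((i * 4 : Nat) : Int)) (some (((i + 1) * 4 : Nat) : Int)))])
      []
  if remainder > 0 then
    key_bytes ++ [str_to_bt (PySem.List.slice cs (some ((iterator * 4 : Nat) : Int)) none)]
  else key_bytes

-- ===== PORT B =====
-- big is a nonnegative Python int throughout, so it is ported as a Nat; Python's
-- <<, |, >>, & on these nonnegative values are exactly Nat's <<<, |||, >>>, &&&.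
def get_key_bytes_alt (key : String) : List (List Int) :=
  let cs := key.toList
  let nblocks := (cs.length + 3) / 4
  let big : Nat := cs.foldl (fun b ch => (b <<< 16) ||| ch.toNat) 0
  let big := big <<< (16 * (4 * nblocks - cs.length))
  let total := 64 * nblocks
  let bits : List Int :=
    (List.range total).map (fun t => (((big >>> (total - 1 - t)) &&& 1 : Nat) : Int))
  (PySem.List.pyRange 0 (total : Int) 64).map
    (fun i => PySem.List.slice bits (some i) (some (i + 64)))

-- ===== PRECONDITION & SPEC =====
def Spec_get_key_bytes (key : String) (out : List (List Int)) : Prop := out = get_key_bytes_alt key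
instance (key : String) (out : List (List Int)) : Decidable (Spec_get_key_bytes key out) := by unfold Spec_get_key_bytes; infer_instance

-- ===== CLAIM (what is proved, stated in full; the proofs are below) =====
def Claim_equal_get_key_bytes : Prop := ∀ (key : String), Dom_get_key_bytes key → Spec_get_key_bytes key (get_key_bytes key)

-- ===== LEMMAS AND PROOFS =====

-- common closed form both ports are reduced to: block b, bit j comes from char 4*b + j/16
def pvClosed (key : String) : List (List Int) :=
  let cs := key.toList
  let n := (cs.length + 3) / 4
  (List.range n).map (fun b =>
    (List.range 64).map (fun j =>
      if 4 * b + j / 16 < cs.length then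
        PySem.Int.band ((cs[4 * b + j / 16]!.toNat : Int) >>> (15 - j % 16)) 1
      else 0))

-- the 16-bit pattern of one character at bit offset r
def pvBit (c : Char) (r : Nat) : Int := PySem.Int.band ((c.toNat : Int) >>> (15 - r)) 1

-- one inner write loop = splice a 16-element segment in place
theorem pv_write_seg (f : Nat → Int) (p : Nat) :
    ∀ (k : Nat) (bt : List Int), 16 * p + k ≤ bt.length →
    (List.range k).foldl (fun b j => b.set (16 * p + j) (f j)) bt
      = bt.take (16 * p) ++ (List.range k).map f ++ bt.drop (16 * p + k) := by
  intro k
  induction k with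
  | zero => intro bt h; simp
  | succ k ih =>
    intro bt h
    have hp : (bt.take (16 * p)).length = 16 * p := by
      rw [List.length_take]; omega
    have hlen : ((bt.take (16 * p) ++ (List.range k).map f).length) = 16 * p + k := by
      simp [hp]
    have hdrop : bt.drop (16 * p + k) = bt[16 * p + k] :: bt.drop (16 * p + k + 1) :=
      List.drop_eq_getElem_cons (by omega)
    rw [List.range_succ (n := k), List.foldl_append, ih bt (by omega), List.foldl_cons,
      List.foldl_nil, List.set_append, hlen, if_neg (by omega), Nat.sub_self, hdrop,
      List.set_cons_zero, List.map_append]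
    simp [List.append_assoc, Nat.add_assoc]

-- the outer per-character loop builds the flattened blocks followed by zeros
theorem pv_flat_len (g : Nat → Nat → Int) (L : Nat) :
    (((List.range L).map (fun i => (List.range 16).map (g i))).flatten).length = 16 * L := by
  induction L with
  | zero => simp
  | succ L ih => rw [List.range_succ (n := L)]; simp_all; omega

theorem pv_outer (g : Nat → Nat → Int) :
    ∀ (L : Nat), L ≤ 4 →
    (List.range L).foldl
        (fun bt i => (List.range 16).foldl (fun b j => b.set (16 * i + j) (g i j)) bt)
        (List.replicate 64 (0 : Int))
      = ((List.range L).map (fun i => (List.range 16).map (g i))).flatten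
          ++ List.replicate (64 - 16 * L) (0 : Int) := by
  intro L
  induction L with
  | zero => intro _; simp
  | succ L ih =>
    intro h
    have ihh := ih (by omega)
    rw [List.range_succ (n := L), List.foldl_append, ihh, List.foldl_cons, List.foldl_nil]
    have hflen := pv_flat_len g L
    have hlen : ((((List.range L).map (fun i => (List.range 16).map (g i))).flatten
        ++ List.replicate (64 - 16 * L) (0 : Int)).length) = 64 := by
      simp [hflen]; omega
    rw [pv_write_seg (g L) L 16 _ (by rw [hlen]; omega)]
    rw [List.map_append, List.flatten_append]
    congr 1
    · rw [← hflen, List.take_left]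
      simp
    · have h2 : 16 * L + 16 = (((List.range L).map (fun i => (List.range 16).map (g i))).flatten).length + 16 := by omega
      rw [h2, List.drop_length_add_append, List.drop_replicate]
      exact congrArg (fun n => List.replicate n (0:Int)) (by omega)

-- zero-writes into the all-zero suffix change nothing
theorem pv_zero_loop (Pre : List Int) :
    ∀ (k p : Nat), Pre.length ≤ 16 * p → 16 * (p + k) ≤ 64 →
    (List.range' p k).foldl
        (fun bt q' => (List.range 16).foldl (fun b q => b.set (16 * q' + q) (0 : Int)) bt)
        (Pre ++ List.replicate (64 - Pre.length) (0 : Int))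
      = Pre ++ List.replicate (64 - Pre.length) (0 : Int) := by
  intro k
  induction k with
  | zero => intro p _ _; simp
  | succ k ih =>
    intro p h1 h2
    rw [List.range'_succ, List.foldl_cons]
    have hlen : (Pre ++ List.replicate (64 - Pre.length) (0 : Int)).length = 64 := by
      simp; omega
    rw [pv_write_seg (fun _ => (0:Int)) p 16 _ (by rw [hlen]; omega)]
    have hmap : (List.range 16).map (fun _ => (0:Int)) = List.replicate 16 0 := by decide
    have htake : (Pre ++ List.replicate (64 - Pre.length) (0 : Int)).take (16 * p)
        = Pre ++ List.replicate (16 * p - Pre.length) (0 : Int) := by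
      have h3 : 16 * p = Pre.length + (16 * p - Pre.length) := by omega
      have h4 : min (16 * p - Pre.length) (64 - Pre.length) = 16 * p - Pre.length := by omega
      rw [h3, List.take_length_add_append, List.take_replicate, h4]
      congr 2
      omega
    have hdrop : (Pre ++ List.replicate (64 - Pre.length) (0 : Int)).drop (16 * p + 16)
        = List.replicate (64 - (16 * p + 16)) (0 : Int) := by
      have h3 : 16 * p + 16 = Pre.length + (16 * p + 16 - Pre.length) := by omega
      have h4 : 64 - Pre.length - (16 * p + 16 - Pre.length) = 64 - (16 * p + 16) := by omega
      rw [h3, List.drop_length_add_append, List.drop_replicate, h4]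
      congr 1
      omega
    rw [hmap, htake, hdrop]
    have hrep : List.replicate (16 * p - Pre.length) (0:Int) ++ (List.replicate 16 (0:Int)
        ++ List.replicate (64 - (16 * p + 16)) (0:Int)) = List.replicate (64 - Pre.length) (0:Int) := by
      rw [← List.replicate_add, ← List.replicate_add]
      congr 1
      omega
    rw [List.append_assoc, List.append_assoc, hrep]
    exact ih (p + 1) (by omega) (by omega)

-- range (a*16) splits into a blocks of 16
theorem pv_range_mul (f : Nat → Int) :
    ∀ (a : Nat), (List.range (a * 16)).map f
      = ((List.range a).map (fun i => (List.range 16).map (fun j => f (16 * i + j)))).flatten := by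
  intro a
  induction a with
  | zero => simp
  | succ a ih =>
    have h16 : (a + 1) * 16 = a * 16 + 16 := by ring
    rw [h16, List.range_add, List.map_append, ih, List.range_succ (n := a), List.map_append,
      List.flatten_append]
    congr 1
    simp only [List.map_cons, List.map_nil, List.flatten_cons, List.flatten_nil,
      List.append_nil, List.map_map]
    apply List.map_congr_left
    intro j _
    simp only [Function.comp_apply]
    congr 1
    omega

-- closed form for str_to_bt on a chunk of at most 4 characters
theorem pv_str_to_bt (s : List Char) (h : s.length ≤ 4) :
    str_to_bt s = (List.range 64).map
      (fun m => if m / 16 < s.length then pvBit s[m / 16]! (m % 16) else 0) := by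
  have h64 : (64 : Nat) = 4 * 16 := by norm_num
  rw [h64, pv_range_mul _ 4]
  have hblk : ∀ i < 4, (List.range 16).map
        (fun j => if (16 * i + j) / 16 < s.length then pvBit s[(16 * i + j) / 16]! ((16 * i + j) % 16) else 0)
      = (List.range 16).map (fun j => if i < s.length then pvBit s[i]! j else 0) := by
    intro i hi
    apply List.map_congr_left
    intro j hj
    rw [List.mem_range] at hj
    have hdiv : (16 * i + j) / 16 = i := by omega
    have hmod : (16 * i + j) % 16 = j := by omega
    rw [hdiv, hmod]
  have hwc : pvWriteChar s
      = fun bt i => (List.range 16).foldl (fun b j => b.set (16 * i + j) (pvBit s[i]! j)) bt := by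
    funext bt i; rfl
  by_cases hlt : s.length < 4
  · have hshape : str_to_bt s = (List.range' s.length (4 - s.length)).foldl
        (fun bt p => (List.range 16).foldl (fun bt q => bt.set (16 * p + q) 0) bt)
        ((List.range s.length).foldl (pvWriteChar s) (List.replicate 64 0)) := by
      simp only [str_to_bt, if_pos hlt]
    rw [hshape]
    rw [hwc]
    rw [pv_outer (fun i j => pvBit s[i]! j) s.length (by omega)]
    have hflen := pv_flat_len (fun i j => pvBit s[i]! j) s.length
    have hzl := pv_zero_loop
      (((List.range s.length).map (fun i => (List.range 16).map (fun j => pvBit s[i]! j))).flatten)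
      (4 - s.length) s.length (by omega) (by omega)
    rw [hflen] at hzl
    rw [hzl]
    have h4 : (4 : Nat) = s.length + (4 - s.length) := by omega
    conv_rhs => rw [h4]
    rw [List.range_add, List.map_append, List.flatten_append]
    congr 1
    · apply congrArg
      apply List.map_congr_left
      intro i hi
      rw [List.mem_range] at hi
      rw [hblk i (by omega)]
      apply List.map_congr_left
      intro j _
      rw [if_pos hi]
    · rw [List.map_map]
      have hzero : ∀ x ∈ List.range (4 - s.length),
          ((fun i => (List.range 16).map (fun j => if (16 * i + j) / 16 < s.length then pvBit s[(16 * i + j) / 16]! ((16 * i + j) % 16) else 0)) ∘ (fun i => s.length + i)) x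
          = List.replicate 16 (0 : Int) := by
        intro x hx
        rw [List.mem_range] at hx
        simp only [Function.comp_apply]
        rw [hblk (s.length + x) (by omega)]
        have hz2 : ∀ j ∈ List.range 16, (if s.length + x < s.length then pvBit s[s.length + x]! j else 0) = (0:Int) := by
          intro j _; rw [if_neg (by omega)]
        rw [List.map_congr_left hz2]
        simp [List.map_const']
      rw [List.map_congr_left hzero]
      rw [List.map_const', List.length_range, List.flatten_replicate_replicate]
      congr 1
      omega
  · have hshape : str_to_bt s = (List.range 4).foldl (pvWriteChar s) (List.replicate 64 0) := by
      simp only [str_to_bt, if_neg hlt]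
    rw [hshape]
    rw [hwc]
    rw [pv_outer (fun i j => pvBit s[i]! j) 4 (by omega)]
    simp only [show 64 - 16 * 4 = 0 from rfl, List.replicate_zero, List.append_nil]
    apply congrArg
    apply List.map_congr_left
    intro i hi
    rw [List.mem_range] at hi
    rw [hblk i hi]
    apply List.map_congr_left
    intro j _
    rw [if_pos (by omega)]

-- each full 4-character chunk of A equals the closed-form block
theorem pv_chunk (cs : List Char) (i : Nat) (hi : i < cs.length / 4) :
    str_to_bt (PySem.List.slice cs (some ((i * 4 : Nat) : Int)) (some (((i + 1) * 4 : Nat) : Int)))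
    = (List.range 64).map (fun j =>
        if 4 * i + j / 16 < cs.length then
          PySem.Int.band ((cs[4 * i + j / 16]!.toNat : Int) >>> (15 - j % 16)) 1
        else 0) := by
  have hi4 : 4 * (i + 1) ≤ cs.length := by omega
  rw [PySem.List.slice_natCast]
  have hc4 : (i + 1) * 4 - i * 4 = 4 := by omega
  rw [hc4]
  have hlen4 : ((cs.drop (i * 4)).take 4).length = 4 := by
    rw [List.length_take, List.length_drop]; omega
  rw [pv_str_to_bt _ (by omega)]
  apply List.map_congr_left
  intro m hm
  rw [List.mem_range] at hm
  rw [if_pos (by omega), if_pos (by omega)]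
  have hidx : ((cs.drop (i * 4)).take 4)[m / 16]! = cs[4 * i + m / 16]! := by
    have h1 : m / 16 < ((cs.drop (i * 4)).take 4).length := by omega
    have h2 : 4 * i + m / 16 < cs.length := by omega
    rw [getElem!_pos ((cs.drop (i * 4)).take 4) (m / 16) h1, getElem!_pos cs (4 * i + m / 16) h2,
      List.getElem_take, List.getElem_drop]
    congr 1
    omega
  rw [hidx]
  rfl

-- A reduces to the closed form
theorem pv_A_closed (key : String) : get_key_bytes key = pvClosed key := by
  simp only [get_key_bytes, pvClosed]
  set cs := key.toList
  by_cases hrem : cs.length % 4 > 0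
  · rw [if_pos hrem]
    have hn : (cs.length + 3) / 4 = cs.length / 4 + 1 := by omega
    rw [hn, List.range_succ (n := cs.length / 4), List.map_append,
      PySem.List.foldl_append_singleton_eq_map, List.nil_append]
    congr 1
    · exact List.map_congr_left (fun i hi => pv_chunk cs i (List.mem_range.mp hi))
    · simp only [List.map_cons, List.map_nil]
      congr 1
      rw [PySem.List.slice_from_natCast]
      have hlenr : (cs.drop (cs.length / 4 * 4)).length = cs.length % 4 := by
        rw [List.length_drop]; omega
      rw [pv_str_to_bt _ (by omega)]
      symm
      apply List.map_congr_left
      intro m hm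
      rw [List.mem_range] at hm
      rw [hlenr]
      have hiff : m / 16 < cs.length % 4 ↔ 4 * (cs.length / 4) + m / 16 < cs.length := by omega
      by_cases hc : m / 16 < cs.length % 4
      · rw [if_pos hc, if_pos (hiff.mp hc)]
        have hidx : (cs.drop (cs.length / 4 * 4))[m / 16]! = cs[4 * (cs.length / 4) + m / 16]! := by
          have h1 : m / 16 < (cs.drop (cs.length / 4 * 4)).length := by omega
          have h2 : 4 * (cs.length / 4) + m / 16 < cs.length := by omega
          rw [getElem!_pos (cs.drop (cs.length / 4 * 4)) (m / 16) h1,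
            getElem!_pos cs (4 * (cs.length / 4) + m / 16) h2, List.getElem_drop]
          congr 1
          omega
        rw [hidx]
        rfl
      · rw [if_neg hc, if_neg (fun hh => hc (hiff.mpr hh))]
  · rw [if_neg hrem]
    have hn : (cs.length + 3) / 4 = cs.length / 4 := by omega
    rw [hn, PySem.List.foldl_append_singleton_eq_map, List.nil_append]
    exact List.map_congr_left (fun i hi => pv_chunk cs i (List.mem_range.mp hi))

-- ===== B-side lemmas: the packed integer's bits are the characters' bits =====

-- the base-2^16 accumulator B's loop builds
def pvPack (ds : List Nat) : Nat := ds.foldl (fun b d => b * 65536 + d) 0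

theorem pv_pack_step (b d : Nat) (hd : d < 65536) : (b <<< 16) ||| d = b * 65536 + d := by
  have hd' : d < 2 ^ 16 := by omega
  rw [Nat.shiftLeft_eq, Nat.mul_comm, ← Nat.two_pow_add_eq_or_of_lt hd' b]

theorem pv_fold_pack_aux : ∀ (cs : List Char) (init : Nat), (∀ c ∈ cs, c.toNat < 65536) →
    cs.foldl (fun b ch => (b <<< 16) ||| ch.toNat) init
      = cs.foldl (fun b c => b * 65536 + c.toNat) init := by
  intro cs
  induction cs with
  | nil => intro init _; rfl
  | cons c cs ih =>
    intro init h
    simp only [List.foldl_cons]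
    rw [pv_pack_step init c.toNat (h c List.mem_cons_self)]
    exact ih _ (fun x hx => h x (List.mem_cons_of_mem c hx))

theorem pv_fold_pack (cs : List Char) (h : ∀ c ∈ cs, c.toNat < 65536) :
    cs.foldl (fun b ch => (b <<< 16) ||| ch.toNat) 0 = pvPack (cs.map Char.toNat) := by
  rw [pvPack, List.foldl_map]
  exact pv_fold_pack_aux cs 0 h

theorem pv_pack_append_zeros (ds : List Nat) : ∀ (p : Nat),
    pvPack (ds ++ List.replicate p 0) = pvPack ds * 65536 ^ p := by
  intro p
  induction p generalizing ds with
  | zero => simp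
  | succ p ih =>
    have h1 : ds ++ List.replicate (p + 1) 0 = (ds ++ [0]) ++ List.replicate p 0 := by
      simp [List.replicate_succ]
    have h2 : pvPack (ds ++ [0]) = pvPack ds * 65536 := by
      simp [pvPack, List.foldl_append]
    rw [h1, ih, h2]
    ring

-- bit extraction from the packed integer: shift 16*(m-1-i)+r reads bit r of digit i
theorem pv_pack_bit (ds : List Nat) (hds : ∀ d ∈ ds, d < 65536) :
    ∀ (i r : Nat), i < ds.length → r < 16 →
    (pvPack ds >>> (16 * (ds.length - 1 - i) + r)) &&& 1 = (ds[i]! >>> r) &&& 1 := by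
  induction ds using List.reverseRecOn with
  | nil => intro i r hi _; simp at hi
  | append_singleton es d ih =>
    intro i r hi hr
    have hd : d < 65536 := hds d (by simp)
    have hes : ∀ x ∈ es, x < 65536 := fun x hx => hds x (by simp [hx])
    have hlen : (es ++ [d]).length = es.length + 1 := by simp
    have hpack : pvPack (es ++ [d]) = pvPack es * 65536 + d := by
      simp [pvPack, List.foldl_append]
    by_cases hlast : i = es.length
    · subst hlast
      have hsh : 16 * ((es ++ [d]).length - 1 - es.length) + r = r := by
        rw [hlen]; omega
      have hget : (es ++ [d])[es.length]! = d := by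
        rw [getElem!_pos (es ++ [d]) es.length (by simp),
          List.getElem_append_right (by omega)]
        simp
      rw [hsh, hget, hpack]
      rw [Nat.and_one_is_mod, Nat.and_one_is_mod, Nat.shiftRight_eq_div_pow,
        Nat.shiftRight_eq_div_pow]
      have hsplit : (65536 : Nat) = 2 ^ (15 - r) * 2 * 2 ^ r := by
        rw [show (65536 : Nat) = 2 ^ 16 from rfl]
        rw [← pow_succ, ← pow_add]
        congr 1
        omega
      rw [hsplit]
      have hpos : 0 < 2 ^ r := Nat.two_pow_pos r
      have hdiv : (pvPack es * (2 ^ (15 - r) * 2 * 2 ^ r) + d) / 2 ^ r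
          = pvPack es * (2 ^ (15 - r) * 2) + d / 2 ^ r := by
        rw [show pvPack es * (2 ^ (15 - r) * 2 * 2 ^ r) + d
            = d + pvPack es * (2 ^ (15 - r) * 2) * 2 ^ r by ring,
          Nat.add_mul_div_right _ _ hpos]
        ring
      rw [hdiv]
      have hmod : (pvPack es * (2 ^ (15 - r) * 2) + d / 2 ^ r) % 2 = (d / 2 ^ r) % 2 := by
        rw [show pvPack es * (2 ^ (15 - r) * 2) = pvPack es * 2 ^ (15 - r) * 2 by ring,
          Nat.add_comm, Nat.add_mul_mod_self_right]
      omega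
    · have hi' : i < es.length := by
        rw [hlen] at hi; omega
      have hsh : 16 * ((es ++ [d]).length - 1 - i) + r
          = 16 + (16 * (es.length - 1 - i) + r) := by
        rw [hlen]; omega
      have hget : (es ++ [d])[i]! = es[i]! := by
        rw [getElem!_pos (es ++ [d]) i (by simp; omega), getElem!_pos es i hi',
          List.getElem_append_left hi']
      rw [hsh, hget, hpack, Nat.shiftRight_add]
      have h16 : (pvPack es * 65536 + d) >>> 16 = pvPack es := by
        rw [Nat.shiftRight_eq_div_pow]
        rw [show pvPack es * 65536 + d = d + pvPack es * 2 ^ 16 by ring]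
        rw [Nat.add_mul_div_right _ _ (by norm_num : 0 < (2:Nat) ^ 16)]
        have : d / 2 ^ 16 = 0 := Nat.div_eq_of_lt (by omega)
        omega
      rw [h16]
      exact ih hes i r hi' hr

-- B reduces to the closed form (Dom bounds every character below 2^16)
theorem pv_B_closed (key : String) (hdom : Dom_get_key_bytes key) :
    get_key_bytes_alt key = pvClosed key := by
  have hchars : ∀ c ∈ key.toList, c.toNat < 65536 := by
    intro c hc
    have := List.all_eq_true.mp hdom c hc
    simp only [pvDomChar, Bool.or_eq_true, Bool.and_eq_true, decide_eq_true_eq,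
      beq_iff_eq] at this
    omega
  simp only [get_key_bytes_alt, pvClosed]
  set cs := key.toList with hcs
  set n := (cs.length + 3) / 4 with hn
  have hle : cs.length ≤ 4 * n := by omega
  set p := 4 * n - cs.length with hp
  set ds : List Nat := cs.map Char.toNat ++ List.replicate p 0 with hds
  have hdslen : ds.length = 4 * n := by
    simp [hds]; omega
  have hdbound : ∀ d ∈ ds, d < 65536 := by
    intro d hd
    rcases List.mem_append.mp hd with h | h
    · obtain ⟨c, hc, rfl⟩ := List.mem_map.mp h
      exact hchars c hc
    · have := List.eq_of_mem_replicate h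
      omega
  have hbig : (cs.foldl (fun b ch => (b <<< 16) ||| ch.toNat) 0) <<< (16 * p) = pvPack ds := by
    rw [pv_fold_pack cs hchars, Nat.shiftLeft_eq, hds, pv_pack_append_zeros]
    rw [show (65536 : Nat) = 2 ^ 16 from rfl, ← pow_mul, Nat.mul_comm 16 p]
  rw [hbig]
  -- the step-64 range is the block indices
  rw [show ((64 * n : Nat) : Int) = 64 * (n : Int) by push_cast; ring,
    PySem.List.pyRange_of_pos 0 (64 * (n : Int)) (by norm_num)]
  by_cases hn0 : n = 0
  · simp [hn0]
  · have hnpos : 0 < n := Nat.pos_of_ne_zero hn0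
    rw [if_pos (by omega)]
    have hcount : ((64 * (n : Int) - 0 + 64 - 1) / 64).toNat = n := by
      have h1 : 64 * (n : Int) - 0 + 64 - 1 = ((64 * n + 63 : Nat) : Int) := by push_cast; ring
      rw [h1, show (64 : Int) = ((64 : Nat) : Int) from rfl, ← Int.natCast_ediv, Int.toNat_natCast]
      omega
    rw [hcount, List.map_map]
    apply List.map_congr_left
    intro b hb
    rw [List.mem_range] at hb
    simp only [Function.comp_apply]
    have hcast1 : (0 : Int) + 64 * (b : Int) = ((64 * b : Nat) : Int) := by push_cast; ring
    rw [hcast1, show (64 : Int) = ((64 : Nat) : Int) from rfl, PySem.List.slice_natCast_add]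
    -- the slice of the bit stream is block b, entry by entry
    apply List.ext_getElem
    · rw [List.length_take, List.length_drop, List.length_map, List.length_range,
        List.length_map, List.length_range]
      omega
    · intro j hj1 hj2
      rw [List.length_take, List.length_drop, List.length_map, List.length_range] at hj1
      simp only [List.getElem_take, List.getElem_drop, List.getElem_map, List.getElem_range]
      set t := 64 * b + j with ht
      have hjlt : j < 64 := by
        rw [List.length_map, List.length_range] at hj2; exact hj2
      have hq : t / 16 = 4 * b + j / 16 := by omega
      have hr : t % 16 = j % 16 := by omega
      have hshift : 64 * n - 1 - t = 16 * (ds.length - 1 - t / 16) + (15 - t % 16) := by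
        rw [hdslen]; omega
      rw [hshift, pv_pack_bit ds hdbound (t / 16) (15 - t % 16) (by rw [hdslen]; omega) (by omega)]
      rw [hq, hr]
      by_cases hc : 4 * b + j / 16 < cs.length
      · rw [if_pos hc]
        have hget : ds[4 * b + j / 16]! = cs[4 * b + j / 16]!.toNat := by
          rw [getElem!_pos ds (4 * b + j / 16) (by rw [hdslen]; omega),
            getElem!_pos cs (4 * b + j / 16) hc]
          simp only [hds]
          rw [List.getElem_append_left (by rw [List.length_map]; exact hc), List.getElem_map]
        rw [hget, ← Int.natCast_shiftRight,
          show (1 : Int) = ((1 : Nat) : Int) from rfl, PySem.Int.band_natCast]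
      · rw [if_neg hc]
        have hget : ds[4 * b + j / 16]! = 0 := by
          rw [getElem!_pos ds (4 * b + j / 16) (by rw [hdslen]; omega)]
          simp only [hds]
          rw [List.getElem_append_right (by rw [List.length_map]; omega)]
          exact List.getElem_replicate _
        rw [hget]
        simp

-- ===== VERDICT (by name: the statement is the Claim_ definition above) =====
theorem get_key_bytes_spec : Claim_equal_get_key_bytes := by
  intro key hdom
  unfold Spec_get_key_bytes
  rw [pv_A_closed, pv_B_closed key hdom]
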